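-- pv_equiv track=rewrite | github.com/saltyjohn/life-game | classes.py | neighbor_pos_gen
-- ===== SOURCE A (Python) =====
-- def neighbor_pos_gen(dist=1):
--     r = range(-dist, dist + 1)
--     for dy in r:
--         for dx in r:
--             if dx == 0 and dy == 0:
--                 continue
--             else:
--                 yield (dx, dy)
-- ===== SOURCE B (Python) =====
-- def neighbor_pos_gen(dist=1):
--     n = len(range(-dist, dist + 1))
--     for i in range(n * n):
--         dy = i // n - dist
--         dx = i % n - dist
--         if dx == 0 and dy == 0:
--             continue
--         yield (dx, dy)
-- ===== Notes on version B (the rewrite author's own statement) =====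
-- stated objective: alternative
-- what changed: Replaces the two nested range loops by one flat pass over a single index i in range(n*n), recovering dx and dy by divmod arithmetic and skipping the center.
import Mathlib
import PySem

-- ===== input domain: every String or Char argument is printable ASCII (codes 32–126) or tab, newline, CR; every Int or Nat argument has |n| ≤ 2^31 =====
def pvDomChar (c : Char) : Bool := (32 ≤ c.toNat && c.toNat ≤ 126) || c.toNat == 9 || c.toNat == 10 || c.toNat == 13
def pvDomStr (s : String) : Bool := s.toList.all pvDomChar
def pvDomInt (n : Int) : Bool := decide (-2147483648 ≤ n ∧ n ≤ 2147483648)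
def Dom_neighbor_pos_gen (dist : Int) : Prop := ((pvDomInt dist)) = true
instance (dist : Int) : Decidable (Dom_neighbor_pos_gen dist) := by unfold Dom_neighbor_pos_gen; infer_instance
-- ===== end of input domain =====

-- B replaces the two nested range loops by one flat pass over a single index with divmod
-- arithmetic (alternative decomposition, same cost); equivalence of return values is proved below.

-- ===== PORT A =====
def neighbor_pos_gen (dist : Int) : List (Int × Int) :=
  let r := PySem.List.pyRange (-dist) (dist + 1) 1
  r.foldl (fun acc dy =>
    r.foldl (fun acc2 dx =>
      if dx = 0 ∧ dy = 0 then acc2 else acc2 ++ [(dx, dy)]) acc) []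

-- ===== PORT B =====
def neighbor_pos_gen_alt (dist : Int) : List (Int × Int) :=
  let n : Int := ((PySem.List.pyRange (-dist) (dist + 1) 1).length : Int)
  (PySem.List.pyRange 0 (n * n) 1).foldl (fun acc i =>
    let dy := PySem.Int.floordiv i n - dist
    let dx := PySem.Int.mod i n - dist
    if dx = 0 ∧ dy = 0 then acc else acc ++ [(dx, dy)]) []

-- ===== PRECONDITION & SPEC =====
def Spec_neighbor_pos_gen (dist : Int) (out : List (Int × Int)) : Prop := out = neighbor_pos_gen_alt dist
instance (dist : Int) (out : List (Int × Int)) : Decidable (Spec_neighbor_pos_gen dist out) := by unfold Spec_neighbor_pos_gen; infer_instance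

-- ===== CLAIM (what is proved, stated in full; the proofs are below) =====
def Claim_equal_neighbor_pos_gen : Prop := ∀ (dist : Int), Dom_neighbor_pos_gen dist → Spec_neighbor_pos_gen dist (neighbor_pos_gen dist)

-- ===== LEMMAS AND PROOFS =====

-- flip an 'if c then acc else acc ++ [x]' into the 'append-if' shape
theorem ite_skip_flip {α : Type} (c : Prop) [Decidable c] (acc : List α) (x : α) :
    (if c then acc else acc ++ [x]) = (if ¬ c then acc ++ [x] else acc) := by
  by_cases h : c <;> simp [h]

-- Nat-level divmod decomposition of a flat filtered-and-mapped range into nested ranges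
theorem range_mul_filter_map {α : Type} (M N : Nat) (p : Nat → Nat → Bool) (g : Nat → Nat → α) :
    ((List.range (M * N)).filter (fun k => p (k / N) (k % N))).map (fun k => g (k / N) (k % N)) =
      (List.range M).flatMap (fun q => ((List.range N).filter (fun r => p q r)).map (fun r => g q r)) := by
  induction M with
  | zero => simp
  | succ M ih =>
    have hsplit : List.range ((M + 1) * N) = List.range (M * N) ++ (List.range N).map (fun r => M * N + r) := by
      rw [Nat.succ_mul, List.range_add]
    rw [hsplit, List.filter_append, List.map_append, ih, List.range_succ, List.flatMap_append]
    congr 1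
    simp only [List.flatMap_cons, List.flatMap_nil, List.append_nil]
    have key : ∀ r ∈ List.range N, (M * N + r) / N = M ∧ (M * N + r) % N = r := by
      intro r hr
      have hrN : r < N := List.mem_range.mp hr
      have hNpos : 0 < N := by omega
      constructor
      · rw [Nat.mul_comm M N, Nat.mul_add_div hNpos, Nat.div_eq_of_lt hrN]; omega
      · rw [Nat.mul_comm M N, Nat.mul_add_mod, Nat.mod_eq_of_lt hrN]
    rw [List.filter_map, List.map_map]
    have hfil : (List.range N).filter ((fun k => p (k / N) (k % N)) ∘ fun r => M * N + r) =
        (List.range N).filter (fun r => p M r) := by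
      apply List.filter_congr
      intro r hr
      simp [Function.comp, (key r hr).1, (key r hr).2]
    rw [hfil]
    apply List.map_congr_left
    intro r hr
    have hr' : r ∈ List.range N := List.mem_of_mem_filter hr
    simp [Function.comp, (key r hr').1, (key r hr').2]

-- A as a nested flatMap/filter/map over List.range
theorem portA_eq (dist : Int) :
    neighbor_pos_gen dist =
      (List.range (2 * dist + 1).toNat).flatMap (fun qy : Nat =>
        ((List.range (2 * dist + 1).toNat).filter
            (fun qx : Nat => decide ¬(-dist + (qx : Int) = 0 ∧ -dist + (qy : Int) = 0))).map
          (fun qx : Nat => (-dist + (qx : Int), -dist + (qy : Int)))) := by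
  simp only [neighbor_pos_gen]
  rw [PySem.List.pyRange_one]
  have hN : (dist + 1 - -dist).toNat = (2 * dist + 1).toNat := by omega
  rw [hN]
  set N := (2 * dist + 1).toNat with hNdef
  set r := (List.range N).map (fun k : Nat => -dist + (k : Int)) with hr
  have inner : ∀ (dy : Int) (acc : List (Int × Int)),
      r.foldl (fun acc2 dx => if dx = 0 ∧ dy = 0 then acc2 else acc2 ++ [(dx, dy)]) acc =
        acc ++ ((List.range N).filter
            (fun qx : Nat => decide ¬(-dist + (qx : Int) = 0 ∧ dy = 0))).map
          (fun qx : Nat => (-dist + (qx : Int), dy)) := by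
    intro dy acc
    have h1 : r.foldl (fun acc2 dx => if dx = 0 ∧ dy = 0 then acc2 else acc2 ++ [(dx, dy)]) acc =
        r.foldl (fun acc2 dx => if ¬(dx = 0 ∧ dy = 0) then acc2 ++ [(dx, dy)] else acc2) acc := by
      apply PySem.List.foldl_congr_mem
      intro a x _
      exact ite_skip_flip _ _ _
    rw [h1, PySem.List.foldl_append_ite]
    rw [hr, List.filter_map, List.map_map]
    rfl
  have h2 : r.foldl (fun acc dy =>
      r.foldl (fun acc2 dx => if dx = 0 ∧ dy = 0 then acc2 else acc2 ++ [(dx, dy)]) acc) [] =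
      r.foldl (fun acc dy => acc ++ ((List.range N).filter
          (fun qx : Nat => decide ¬(-dist + (qx : Int) = 0 ∧ dy = 0))).map
        (fun qx : Nat => (-dist + (qx : Int), dy))) [] := by
    apply PySem.List.foldl_congr_mem
    intro a x _
    exact inner x a
  rw [h2, PySem.List.foldl_append_eq_flatMap]
  rw [hr, List.flatMap_map]
  rfl

-- B as a flat filter/map over List.range (N*N)
theorem portB_eq (dist : Int) (h : 0 ≤ dist) :
    neighbor_pos_gen_alt dist =
      ((List.range ((2 * dist + 1).toNat * (2 * dist + 1).toNat)).filter
          (fun k : Nat => decide ¬(((k % (2 * dist + 1).toNat : Nat) : Int) - dist = 0 ∧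
                             ((k / (2 * dist + 1).toNat : Nat) : Int) - dist = 0))).map
        (fun k : Nat => (((k % (2 * dist + 1).toNat : Nat) : Int) - dist,
                   ((k / (2 * dist + 1).toNat : Nat) : Int) - dist)) := by
  simp only [neighbor_pos_gen_alt]
  rw [PySem.List.length_pyRange_one]
  have hN : (dist + 1 - -dist).toNat = (2 * dist + 1).toNat := by omega
  rw [hN]
  set N := (2 * dist + 1).toNat with hNdef
  have hmul : ((N : Int) * (N : Int)) = ((N * N : Nat) : Int) := by push_cast; ring
  rw [hmul, PySem.List.pyRange_one]
  have htn : (((N * N : Nat) : Int) - 0).toNat = N * N := by omega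
  rw [htn]
  rw [List.foldl_map]
  have h2 : (List.range (N * N)).foldl
      (fun (acc : List (Int × Int)) (k : Nat) =>
        if PySem.Int.mod ((0 : Int) + (k : Int)) (N : Int) - dist = 0 ∧ PySem.Int.floordiv ((0 : Int) + (k : Int)) (N : Int) - dist = 0
        then acc
        else acc ++ [(PySem.Int.mod ((0 : Int) + (k : Int)) (N : Int) - dist, PySem.Int.floordiv ((0 : Int) + (k : Int)) (N : Int) - dist)]) [] =
      (List.range (N * N)).foldl
        (fun (acc : List (Int × Int)) (k : Nat) => if ¬(((k % N : Nat) : Int) - dist = 0 ∧ ((k / N : Nat) : Int) - dist = 0)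
          then acc ++ [(((k % N : Nat) : Int) - dist, ((k / N : Nat) : Int) - dist)] else acc) [] := by
    apply PySem.List.foldl_congr_mem
    intro a k _
    rw [zero_add, PySem.Int.floordiv_natCast, PySem.Int.mod_natCast]
    exact ite_skip_flip _ _ _
  rw [h2, PySem.List.foldl_append_ite]
  simp

-- ===== VERDICT (by name: the statement is the Claim_ definition above) =====
theorem neighbor_pos_gen_spec : Claim_equal_neighbor_pos_gen := by
  intro dist _
  unfold Spec_neighbor_pos_gen
  by_cases h : dist < 0
  · have hA : PySem.List.pyRange (-dist) (dist + 1) 1 = [] :=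
      PySem.List.pyRange_one_eq_nil (by omega)
    simp only [neighbor_pos_gen, neighbor_pos_gen_alt, hA]
    simp [PySem.List.pyRange_one_eq_nil (by omega : (0 : Int) ≤ 0)]
  · have h0 : 0 ≤ dist := by omega
    rw [portA_eq dist, portB_eq dist h0]
    set N := (2 * dist + 1).toNat with hNdef
    rw [range_mul_filter_map N N
      (fun q r => decide ¬((r : Int) - dist = 0 ∧ (q : Int) - dist = 0))
      (fun q r => ((r : Int) - dist, (q : Int) - dist))]
    refine List.flatMap_congr ?_
    intro qy _
    have hfil : (List.range N).filter
        (fun qx : Nat => decide ¬(-dist + (qx : Int) = 0 ∧ -dist + (qy : Int) = 0)) =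
        (List.range N).filter
        (fun r : Nat => decide ¬((r : Int) - dist = 0 ∧ (qy : Int) - dist = 0)) := by
      apply List.filter_congr
      intro r _
      have heq : (-dist + (r : Int) = 0 ∧ -dist + (qy : Int) = 0) ↔
          ((r : Int) - dist = 0 ∧ (qy : Int) - dist = 0) := by
        constructor <;> (intro hv; exact ⟨by omega, by omega⟩)
      simp [heq]
    rw [hfil]
    apply List.map_congr_left
    intro r _
    have h1 : -dist + (r : Int) = (r : Int) - dist := by omega
    have h2 : -dist + (qy : Int) = (qy : Int) - dist := by omega
    rw [h1, h2]
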